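-- pv_equiv track=rewrite | github.com/HYUNSIK-JI/Algorithm | 프로그래머스/Level 2/더 맵게.py | solution
-- ===== SOURCE A (Python) =====
-- import heapq
--
-- def solution(scoville, K):
--     answer = 0
--     heapq.heapify(scoville)
--     result = []
--
--     while scoville:
--         if scoville[0] >= K and not result:
--             return answer
--         result.append(heapq.heappop(scoville))
--
--         if len(result) == 2:
--             heapq.heappush(scoville, result[0] + result[1] * 2)
--             answer += 1
--             result = []
--     return -1
-- ===== SOURCE B (Python) =====
-- def solution(scoville, K):
--     lst = sorted(scoville)
--     answer = 0
--     while lst and lst[0] < K: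
--         if len(lst) < 2:
--             return -1
--         a = lst.pop(0)
--         b = lst.pop(0)
--         c = a + 2 * b
--         lo, hi = 0, len(lst)
--         while lo < hi:
--             mid = (lo + hi) // 2
--             if c < lst[mid]:
--                 hi = mid
--             else:
--                 lo = mid + 1
--         lst.insert(lo, c)
--         answer += 1
--     return answer if lst else -1
-- ===== Notes on version B (the rewrite author's own statement) =====
-- stated objective: alternative
-- what changed: Replaces the binary heap plus a two-slot 'result' buffer (with a mid-loop peek/reset dance) by a single sorted list: pop the two smallest from the front and re-insert the mix at the position found by a binary search, which makes the mix step and the edge cases (empty list, single element) direct.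
import Mathlib
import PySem

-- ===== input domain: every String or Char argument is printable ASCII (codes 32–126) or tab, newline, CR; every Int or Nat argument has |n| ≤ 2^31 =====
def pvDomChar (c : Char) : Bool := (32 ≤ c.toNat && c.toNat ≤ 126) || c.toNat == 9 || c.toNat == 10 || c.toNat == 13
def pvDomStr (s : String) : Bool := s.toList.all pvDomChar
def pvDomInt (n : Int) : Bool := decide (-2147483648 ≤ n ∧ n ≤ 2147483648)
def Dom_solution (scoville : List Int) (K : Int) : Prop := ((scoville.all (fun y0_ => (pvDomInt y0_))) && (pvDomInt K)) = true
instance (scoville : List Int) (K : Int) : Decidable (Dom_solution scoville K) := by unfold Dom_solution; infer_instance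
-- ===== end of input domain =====

-- B replaces A's heap-plus-two-slot-buffer loop with a sorted list: pop the two smallest
-- from the front and insert the mix in order (objective: simpler decomposition, same cost).
-- A mutates its `scoville` argument in place (heapify/pops); B does not — the claim is about
-- the return value only.

-- ===== PORT A =====
-- heapq is modelled by its observable behaviour on the heap as a multiset:
-- heap[0] is the minimum, heappop removes the first occurrence of the minimum,
-- heappush adds the element (the internal array layout is unobservable to A,
-- which only ever reads heap[0] and heappop results).
def heapMin : List Int → Int
  | [] => 0          -- unreachable: A only reads scoville[0] on a nonempty heap
  | x :: xs => xs.foldl min x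

def heapPopRest (l : List Int) : List Int := l.erase (heapMin l)

-- needed by loopA's termination proof
lemma foldl_min_mem (xs : List Int) (x : Int) : xs.foldl min x ∈ x :: xs := by
  induction xs generalizing x with
  | nil => simp
  | cons y ys ih =>
    have h := ih (min x y)
    rcases List.mem_cons.mp h with h1 | h1
    · rcases min_choice x y with hc | hc <;> rw [List.foldl_cons, h1, hc] <;> simp
    · simp [List.foldl_cons, List.mem_cons.mpr (Or.inr (List.mem_cons.mpr (Or.inr h1)))]

lemma heapPopRest_length (x : Int) (xs : List Int) :
    (heapPopRest (x :: xs)).length = xs.length := by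
  have hmem : heapMin (x :: xs) ∈ x :: xs := foldl_min_mem xs x
  rw [heapPopRest, List.length_erase_of_mem hmem]
  simp

-- the loop of A: `result` is the two-slot buffer, one recursive call per `while` iteration
def loopA (K : Int) (scoville : List Int) (result : List Int) (answer : Int) : Int :=
  match scoville with
  | [] => -1
  | x :: xs =>
    if heapMin (x :: xs) ≥ K ∧ result = [] then answer
    else
      if (result ++ [heapMin (x :: xs)]).length = 2 then
        loopA K (heapPopRest (x :: xs) ++
            [PySem.List.pyGetD (result ++ [heapMin (x :: xs)]) 0 0 +
              PySem.List.pyGetD (result ++ [heapMin (x :: xs)]) 1 0 * 2])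
          [] (answer + 1)
      else
        loopA K (heapPopRest (x :: xs)) (result ++ [heapMin (x :: xs)]) answer
termination_by 2 * scoville.length + result.length
decreasing_by
  · have h := heapPopRest_length x xs
    simp only [List.length_append, List.length_cons, List.length_nil] at *
    omega
  · have h := heapPopRest_length x xs
    simp only [List.length_append, List.length_cons, List.length_nil] at *
    omega

def solution (scoville : List Int) (K : Int) : Int :=
  loopA K scoville [] 0

-- ===== PORT B =====
-- the inner `while lo < hi` binary search of Source B (position just after the elements ≤ c)
-- structural recursion on `fuel`, called with fuel = hi - lo (the loop runs at most
-- hi - lo times since the interval shrinks every iteration)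
def bsearchR (c : Int) (lst : List Int) : Nat → Nat → Nat → Nat
  | 0, lo, _ => lo
  | fuel + 1, lo, hi =>
    if lo < hi then
      if c < PySem.List.pyGetD lst (((lo + hi) / 2 : Nat) : Int) 0 then
        bsearchR c lst fuel lo ((lo + hi) / 2)
      else
        bsearchR c lst fuel ((lo + hi) / 2 + 1) hi
    else lo

-- needed by loopB's termination proof
lemma bsearchR_le (c : Int) (lst : List Int) :
    ∀ (fuel lo hi : Nat), lo ≤ hi → bsearchR c lst fuel lo hi ≤ hi := by
  intro fuel
  induction fuel with
  | zero => intro lo hi h2; simpa [bsearchR] using h2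
  | succ n ih =>
    intro lo hi h2
    rw [bsearchR]
    split
    · split
      · exact le_trans (ih lo ((lo + hi) / 2) (by omega)) (by omega)
      · exact ih ((lo + hi) / 2 + 1) hi (by omega)
    · omega

def loopB (K : Int) (lst : List Int) (answer : Int) : Int :=
  match lst with
  | [] => -1                               -- `return answer if lst else -1`, empty case
  | a :: rest =>
    if a < K then
      match rest with
      | [] => -1                           -- `if len(lst) < 2: return -1`
      | b :: rest2 =>
        loopB K
          (rest2.insertIdx (bsearchR (a + 2 * b) rest2 rest2.length 0 rest2.length) (a + 2 * b))
          (answer + 1)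
    else answer
termination_by lst.length
decreasing_by
  have h := bsearchR_le (a + 2 * b) rest2 rest2.length 0 rest2.length (by omega)
  simp [List.length_insertIdx, h]

def solution_alt (scoville : List Int) (K : Int) : Int :=
  loopB K (PySem.List.sorted scoville (fun x => x) false) 0

-- ===== PRECONDITION & SPEC =====
def Spec_solution (scoville : List Int) (K : Int) (out : Int) : Prop := out = solution_alt scoville K
instance (scoville : List Int) (K : Int) (out : Int) : Decidable (Spec_solution scoville K out) := by unfold Spec_solution; infer_instance

-- ===== CLAIM (what is proved, stated in full; the proofs are below) =====
def Claim_equal_solution : Prop := ∀ (scoville : List Int) (K : Int), Dom_solution scoville K → Spec_solution scoville K (solution scoville K)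

-- ===== LEMMAS AND PROOFS =====

lemma foldl_min_le_init (xs : List Int) (x : Int) : xs.foldl min x ≤ x := by
  induction xs generalizing x with
  | nil => simp
  | cons y ys ih => exact le_trans (ih (min x y)) (min_le_left x y)

lemma foldl_min_le (xs : List Int) (x y : Int) (h : y ∈ x :: xs) : xs.foldl min x ≤ y := by
  induction xs generalizing x with
  | nil => simp at h; simp [h]
  | cons z zs ih =>
    rcases List.mem_cons.mp h with h1 | h1
    · subst h1
      exact le_trans (foldl_min_le_init zs (min y z)) (min_le_left y z)
    · rcases List.mem_cons.mp h1 with h2 | h2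
      · subst h2
        exact le_trans (foldl_min_le_init zs (min x y)) (min_le_right x y)
      · exact ih (min x z) (List.mem_cons.mpr (Or.inr h2))

-- on a heap whose multiset is a::s' with a::s' sorted, heap[0] is a
lemma heapMin_eq_head (a : Int) (s' l : List Int)
    (hp : (a :: s').Perm l) (hs : (a :: s').Pairwise (· ≤ ·)) : heapMin l = a := by
  obtain ⟨x, xs, rfl⟩ : ∃ x xs, l = x :: xs := by
    cases l with
    | nil => exact absurd hp.length_eq (by simp)
    | cons x xs => exact ⟨x, xs, rfl⟩
  have hmem : heapMin (x :: xs) ∈ a :: s' := hp.symm.mem_iff.mp (foldl_min_mem xs x)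
  have hle : heapMin (x :: xs) ≤ a :=
    foldl_min_le xs x a (hp.mem_iff.mp List.mem_cons_self)
  have hge : a ≤ heapMin (x :: xs) := by
    rcases List.mem_cons.mp hmem with h1 | h1
    · exact le_of_eq h1.symm
    · exact (List.pairwise_cons.mp hs).1 _ h1
  omega

lemma loopA_nil (K ans : Int) (r : List Int) : loopA K [] r ans = -1 := by
  rw [loopA.eq_def]

lemma loopA_cons (K ans : Int) (x : Int) (xs r : List Int) :
    loopA K (x :: xs) r ans =
      if heapMin (x :: xs) ≥ K ∧ r = [] then ans
      else
        if (r ++ [heapMin (x :: xs)]).length = 2 then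
          loopA K (heapPopRest (x :: xs) ++
              [PySem.List.pyGetD (r ++ [heapMin (x :: xs)]) 0 0 +
                PySem.List.pyGetD (r ++ [heapMin (x :: xs)]) 1 0 * 2]) [] (ans + 1)
        else loopA K (heapPopRest (x :: xs)) (r ++ [heapMin (x :: xs)]) ans := by
  rw [loopA.eq_def]

lemma loopB_nil (K ans : Int) : loopB K [] ans = -1 := by
  rw [loopB.eq_def]

lemma loopB_cons (K ans a : Int) (rest : List Int) :
    loopB K (a :: rest) ans =
      if a < K then
        match rest with
        | [] => -1
        | b :: rest2 =>
          loopB K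
            (rest2.insertIdx (bsearchR (a + 2 * b) rest2 rest2.length 0 rest2.length) (a + 2 * b))
            (ans + 1)
      else ans := by
  rw [loopB.eq_def]

-- binary-search characterisation: every index below the result holds an element ≤ c,
-- every index at or above it (within the list) an element > c
lemma bsearchR_char (c : Int) (l : List Int) (hs : l.Pairwise (· ≤ ·)) :
    ∀ (fuel lo hi : Nat), hi - lo ≤ fuel → lo ≤ hi → hi ≤ l.length →
    (∀ j, j < lo → l.getD j 0 ≤ c) → (∀ j, hi ≤ j → j < l.length → c < l.getD j 0) →
    (∀ j, j < bsearchR c l fuel lo hi → l.getD j 0 ≤ c) ∧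
      (∀ j, bsearchR c l fuel lo hi ≤ j → j < l.length → c < l.getD j 0) := by
  have hmono : ∀ (p q : Nat), p ≤ q → q < l.length → l.getD p 0 ≤ l.getD q 0 := by
    intro p q hpq hq
    rw [List.getD_eq_getElem l 0 (by omega), List.getD_eq_getElem l 0 hq]
    rcases Nat.eq_or_lt_of_le hpq with rfl | hlt
    · rfl
    · exact List.pairwise_iff_getElem.mp hs p q (by omega) hq hlt
  intro fuel
  induction fuel with
  | zero =>
    intro lo hi h1 h2 h3 hlow hhigh
    have : lo = hi := by omega
    subst this
    exact ⟨hlow, hhigh⟩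
  | succ n ih =>
    intro lo hi h1 h2 h3 hlow hhigh
    rw [bsearchR]
    by_cases hlt : lo < hi
    · rw [if_pos hlt]
      have hmid : (lo + hi) / 2 < l.length := by omega
      have hget : PySem.List.pyGetD l (((lo + hi) / 2 : Nat) : Int) 0
          = l.getD ((lo + hi) / 2) 0 := PySem.List.pyGetD_natCast l _ 0
      by_cases hc : c < PySem.List.pyGetD l (((lo + hi) / 2 : Nat) : Int) 0
      · rw [if_pos hc]
        rw [hget] at hc
        refine ih lo ((lo + hi) / 2) (by omega) (by omega) (by omega) hlow ?_
        intro j hj hjlen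
        exact lt_of_lt_of_le hc (hmono _ _ hj hjlen)
      · rw [if_neg hc]
        rw [hget] at hc
        refine ih ((lo + hi) / 2 + 1) hi (by omega) (by omega) h3 ?_ hhigh
        intro j hj
        exact le_trans (hmono _ _ (by omega) hmid) (by omega)
    · rw [if_neg hlt]
      have : lo = hi := by omega
      subst this
      exact ⟨hlow, hhigh⟩

lemma insertIdx_sorted (c : Int) (l : List Int) (i : Nat) (hi : i ≤ l.length)
    (hs : l.Pairwise (· ≤ ·))
    (hlow : ∀ j, j < i → l.getD j 0 ≤ c)
    (hhigh : ∀ j, i ≤ j → j < l.length → c < l.getD j 0) :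
    (l.insertIdx i c).Pairwise (· ≤ ·) := by
  have heq : l.insertIdx i c = l.take i ++ c :: l.drop i := by
    clear hlow hhigh hs
    induction i generalizing l with
    | zero => simp
    | succ n ihn =>
      cases l with
      | nil => simp at hi
      | cons x xs =>
        simp only [List.insertIdx_succ_cons, List.take_succ_cons, List.drop_succ_cons,
          List.cons_append]
        rw [ihn xs (by simpa using hi)]
  have htake : ∀ x ∈ l.take i, x ≤ c := by
    intro x hx
    obtain ⟨j, hj, hjx⟩ := List.mem_iff_getElem.mp hx
    have hj' : j < i := by have := List.length_take_le i l; omega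
    have hjl : j < l.length := by have := hj; simp [List.length_take] at this; omega
    have : x = l[j] := by rw [← hjx, List.getElem_take]
    rw [this, ← List.getD_eq_getElem l 0 hjl]
    exact hlow j hj'
  have hdrop : ∀ y ∈ l.drop i, c < y := by
    intro y hy
    obtain ⟨j, hj, hjy⟩ := List.mem_iff_getElem.mp hy
    have hjl : i + j < l.length := by simp [List.length_drop] at hj; omega
    have : y = l[i + j] := by rw [← hjy, List.getElem_drop]
    rw [this, ← List.getD_eq_getElem l 0 hjl]
    exact hhigh (i + j) (by omega) hjl
  rw [heq, List.pairwise_append]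
  refine ⟨hs.take, ?_, ?_⟩
  · rw [List.pairwise_cons]
    exact ⟨fun y hy => le_of_lt (hdrop y hy), hs.drop⟩
  · intro x hx y hy
    rcases List.mem_cons.mp hy with rfl | hy'
    · exact htake x hx
    · exact le_trans (htake x hx) (le_of_lt (hdrop y hy'))

-- the main simulation: A's heap loop on multiset l equals B's sorted-list loop on s ~ l
lemma loop_eq (K : Int) : ∀ (n : Nat) (l s : List Int) (ans : Int), l.length ≤ n →
    s.Perm l → s.Pairwise (· ≤ ·) → loopA K l [] ans = loopB K s ans := by
  intro n
  induction n with
  | zero =>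
    intro l s ans hn hp _
    have hl : l = [] := List.length_eq_zero_iff.mp (by omega)
    have hsn : s = [] := List.Perm.eq_nil (by rw [hl] at hp; exact hp)
    subst hl hsn
    rw [loopA_nil, loopB_nil]
  | succ n ih =>
    intro l s ans hn hp hs
    cases s with
    | nil =>
      have hl : l = [] := List.Perm.eq_nil hp.symm
      subst hl; rw [loopA_nil, loopB_nil]
    | cons a s' =>
      obtain ⟨x, xs, rfl⟩ : ∃ x xs, l = x :: xs := by
        cases l with
        | nil => exact absurd hp.length_eq (by simp)
        | cons x xs => exact ⟨x, xs, rfl⟩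
      have hmin : heapMin (x :: xs) = a := heapMin_eq_head a s' _ hp hs
      rw [loopA_cons, loopB_cons]
      by_cases hK : a < K
      · rw [if_neg (by simp [hmin]; omega), if_pos hK]
        rw [if_neg (by simp)]
        -- one element popped into `result`; the remaining heap is a permutation of s'
        have hrest : s'.Perm (heapPopRest (x :: xs)) := by
          have := hp.erase a
          rw [List.erase_cons_head] at this
          unfold heapPopRest; rw [hmin]; exact this
        cases s' with
        | nil =>
          have h0 : heapPopRest (x :: xs) = [] := List.Perm.eq_nil hrest.symm
          rw [h0, loopA_nil]
        | cons b s'' =>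
          obtain ⟨y, ys, hyys⟩ : ∃ y ys, heapPopRest (x :: xs) = y :: ys := by
            cases h : heapPopRest (x :: xs) with
            | nil => rw [h] at hrest; exact absurd hrest.length_eq (by simp)
            | cons y ys => exact ⟨y, ys, rfl⟩
          rw [hyys] at hrest
          have hs' : (b :: s'').Pairwise (· ≤ ·) := (List.pairwise_cons.mp hs).2
          have hmin2 : heapMin (y :: ys) = b := heapMin_eq_head b s'' _ hrest hs'
          rw [hyys, loopA_cons]
          rw [if_neg (by simp), if_pos (by simp)]
          -- both sides now mix the two smallest into a + 2*b
          have hrest2 : s''.Perm (heapPopRest (y :: ys)) := by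
            have := hrest.erase b
            rw [List.erase_cons_head] at this
            unfold heapPopRest; rw [hmin2]; exact this
          have hv : PySem.List.pyGetD ([] ++ [heapMin (x :: xs)] ++ [heapMin (y :: ys)]) 0 0 +
              PySem.List.pyGetD ([] ++ [heapMin (x :: xs)] ++ [heapMin (y :: ys)]) 1 0 * 2
              = a + 2 * b := by
            simp [hmin, hmin2, PySem.List.pyGetD, PySem.List.pyIdx?, PySem.List.pyGet?]
            ring
          rw [hv]
          have hlen : (heapPopRest (y :: ys) ++ [a + 2 * b]).length ≤ n := by
            have h1 := hp.length_eq
            have h2 := hrest.length_eq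
            have h3 := heapPopRest_length y ys
            simp only [List.length_append, List.length_cons, List.length_nil] at *
            omega
          have hs'' : s''.Pairwise (· ≤ ·) := (List.pairwise_cons.mp hs').2
          have hle2 : bsearchR (a + 2 * b) s'' s''.length 0 s''.length ≤ s''.length :=
            bsearchR_le _ _ s''.length 0 s''.length (by omega)
          have hchar := bsearchR_char (a + 2 * b) s'' hs'' s''.length 0 s''.length
            (by omega) (by omega) le_rfl (by omega) (by omega)
          have hperm : (s''.insertIdx (bsearchR (a + 2 * b) s'' s''.length 0 s''.length)
                (a + 2 * b)).Perm (heapPopRest (y :: ys) ++ [a + 2 * b]) :=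
            (List.perm_insertIdx _ _ hle2).trans
              ((hrest2.cons _).trans (List.perm_append_singleton _ _).symm)
          have hsorted : (s''.insertIdx (bsearchR (a + 2 * b) s'' s''.length 0 s''.length)
                (a + 2 * b)).Pairwise (· ≤ ·) :=
            insertIdx_sorted _ _ _ hle2 hs'' hchar.1 hchar.2
          exact ih _ _ _ hlen hperm hsorted
      · rw [if_pos ⟨by rw [hmin]; omega, rfl⟩, if_neg hK]

-- ===== VERDICT (by name: the statement is the Claim_ definition above) =====
theorem solution_spec : Claim_equal_solution := by
  intro scoville K _
  unfold Spec_solution solution solution_alt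
  exact loop_eq K scoville.length scoville _ 0 le_rfl
    (PySem.List.sorted_perm scoville (fun x => x) false)
    (PySem.List.sorted_pairwise scoville (fun x => x))
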